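-- pv_equiv track=rewrite | github.com/rsbohn/waffle8 | tools/generate_calendar_tape.py | chunk_lines
-- ===== SOURCE A (Python) =====
-- from typing import Iterable, List
--
-- def chunk_lines(bits: Iterable[str], label: str, width: int = 64) -> List[str]:
--     """Group six-bit chunks into labelled tape records."""
--     lines: List[str] = []
--     group: List[str] = []
--     counter = 1
--
--     for bit in bits:
--         group.append(bit)
--         if len(group) == width:
--             lines.append(f"{label}{counter:03o}: " + " ".join(group))
--             counter += 1
--             group = []
--
--     if group:
--         lines.append(f"{label}{counter:03o}: " + " ".join(group))
--
--     return lines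
-- ===== SOURCE B (Python) =====
-- from typing import Iterable, List
--
-- def chunk_lines(bits: Iterable[str], label: str, width: int = 64) -> List[str]:
--     """Group six-bit chunks into labelled tape records."""
--     lst = list(bits)
--     out: List[str] = []
--     counter = 1
--     while lst:
--         out.append(f"{label}{counter:03o}: " + " ".join(lst[:width]))
--         lst = lst[width:]
--         counter += 1
--     return out
-- ===== Notes on version B (the rewrite author's own statement) =====
-- stated objective: simpler
-- what changed: B slices the next chunk off the front of the list (lst[:width] / lst[width:]) per loop iteration instead of A's element-by-element accumulator buffer with a separate trailing-remainder flush.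
-- outside the precondition, e.g. on chunk_lines(['a', 'b'], 'L', 0): A returns ['L001: a b'], B does not finish within the time limit
import Mathlib
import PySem

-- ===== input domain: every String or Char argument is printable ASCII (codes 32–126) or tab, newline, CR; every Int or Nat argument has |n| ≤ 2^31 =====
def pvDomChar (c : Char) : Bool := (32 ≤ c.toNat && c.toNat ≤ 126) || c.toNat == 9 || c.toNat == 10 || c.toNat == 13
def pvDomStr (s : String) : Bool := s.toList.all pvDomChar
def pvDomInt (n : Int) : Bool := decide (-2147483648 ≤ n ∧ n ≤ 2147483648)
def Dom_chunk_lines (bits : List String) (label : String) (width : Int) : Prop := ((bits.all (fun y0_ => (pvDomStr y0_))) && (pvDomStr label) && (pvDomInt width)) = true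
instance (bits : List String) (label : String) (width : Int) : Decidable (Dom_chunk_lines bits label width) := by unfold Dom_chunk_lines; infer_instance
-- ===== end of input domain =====

-- B slices each chunk off the front of the list instead of A's element accumulator with a trailing flush; same return value for width ≥ 1 (or empty input).


-- shared formatting helper: f"{n:03o}" (octal, zero-padded to 3); both Pythons format the counter the same way
def fmtOct3 (n : Int) : String :=
  if n < 0 then PySem.Str.zfill ("-" ++ String.ofList (Nat.toDigits 8 (-n).toNat)) 3
  else PySem.Str.zfill (String.ofList (Nat.toDigits 8 n.toNat)) 3

-- ===== PORT A =====
-- step-for-step port of A's for-loop state (lines, group, counter), then the trailing flush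
def chunk_lines (bits : List String) (label : String) (width : Int) : List String :=
  let st := bits.foldl (fun (st : List String × List String × Int) bit =>
    match st with
    | (lines, group, counter) =>
      let group := group ++ [bit]
      if PySem.List.len group = width then
        (lines ++ [label ++ fmtOct3 counter ++ ": " ++ PySem.Str.join " " group], ([] : List String), counter + 1)
      else (lines, group, counter)) ([], [], 1)
  match st with
  | (lines, group, counter) =>
    if group ≠ [] then lines ++ [label ++ fmtOct3 counter ++ ": " ++ PySem.Str.join " " group]
    else lines

-- ===== PORT B =====
-- port of B's while-loop; fuel (= initial length) only makes the recursion total where the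
-- Python loop would not terminate (width ≤ 0 with a non-empty list, outside Pre_)
def chunkLoopB (label : String) (width : Int) : Nat → List String → Int → List String → List String
  | _, [], _, out => out
  | 0, _ :: _, _, out => out
  | fuel + 1, lst@(_ :: _), counter, out =>
      chunkLoopB label width fuel (PySem.List.slice lst (some width) none) (counter + 1)
        (out ++ [label ++ fmtOct3 counter ++ ": " ++ PySem.Str.join " " (PySem.List.slice lst none (some width))])

def chunk_lines_alt (bits : List String) (label : String) (width : Int) : List String :=
  chunkLoopB label width bits.length bits 1 []

-- ===== PRECONDITION & SPEC =====
-- Pre_ restricts to the function's natural domain: width ≥ 1 (or nothing to chunk). For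
-- width ≤ 0 with non-empty bits A accidentally emits everything as one unbounded record
-- while B's while-loop never terminates, so those inputs are excluded.
def Pre_chunk_lines (bits : List String) (label : String) (width : Int) : Prop :=
  bits = [] ∨ 1 ≤ width
instance (bits : List String) (label : String) (width : Int) : Decidable (Pre_chunk_lines bits label width) := by unfold Pre_chunk_lines; infer_instance

def pvWitness_chunk_lines : List String × String × Int := (["10", "01", "11"], "K", 2)

def Spec_chunk_lines (bits : List String) (label : String) (width : Int) (out : List String) : Prop := out = chunk_lines_alt bits label width
instance (bits : List String) (label : String) (width : Int) (out : List String) : Decidable (Spec_chunk_lines bits label width out) := by unfold Spec_chunk_lines; infer_instance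

-- ===== CLAIM (what is proved, stated in full; the proofs are below) =====
def Claim_equal_chunk_lines : Prop := ∀ (bits : List String) (label : String) (width : Int), Dom_chunk_lines bits label width → Pre_chunk_lines bits label width → Spec_chunk_lines bits label width (chunk_lines bits label width)

-- ===== LEMMAS AND PROOFS =====

-- proof-only helpers: named copies of A's loop body and trailing flush (chunk_lines is definitionally flushA ∘ foldl stepA)
def stepA (label : String) (width : Int) (st : List String × List String × Int) (bit : String) : List String × List String × Int :=
  match st with
  | (lines, group, counter) =>
    let group := group ++ [bit]
    if PySem.List.len group = width then
      (lines ++ [label ++ fmtOct3 counter ++ ": " ++ PySem.Str.join " " group], ([] : List String), counter + 1)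
    else (lines, group, counter)

def flushA (label : String) (width : Int) (st : List String × List String × Int) : List String :=
  match st with
  | (lines, group, counter) =>
    if group ≠ [] then lines ++ [label ++ fmtOct3 counter ++ ": " ++ PySem.Str.join " " group]
    else lines

theorem chunk_lines_eq (bits : List String) (label : String) (width : Int) :
    chunk_lines bits label width = flushA label width (bits.foldl (stepA label width) ([], [], 1)) := rfl

theorem chunkLoopB_nil (label : String) (width : Int) (fuel : Nat) (c : Int) (out : List String) :
    chunkLoopB label width fuel [] c out = out := by cases fuel <;> simp [chunkLoopB]

theorem loop_main (label : String) (width : Int) (hw : 1 ≤ width) :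
    ∀ (xs g lines : List String) (c : Int) (fuel : Nat),
      (g.length : Int) < width → (g ++ xs).length ≤ fuel →
      flushA label width (xs.foldl (stepA label width) (lines, g, c))
        = chunkLoopB label width fuel (g ++ xs) c lines := by
  intro xs
  induction xs with
  | nil =>
    intro g lines c fuel hg hfuel
    simp only [List.foldl_nil, List.append_nil] at *
    cases g with
    | nil => simp [flushA, chunkLoopB_nil]
    | cons y ys =>
      cases fuel with
      | zero => simp at hfuel
      | succ f =>
        have hle : (y :: ys).length ≤ width.toNat := by omega
        have htake : PySem.List.slice (y :: ys) none (some width) = y :: ys := by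
          rw [PySem.List.slice_to _ (by omega)]; exact List.take_of_length_le hle
        have hdrop : PySem.List.slice (y :: ys) (some width) none = [] := by
          rw [PySem.List.slice_from _ (by omega)]; exact List.drop_eq_nil_of_le hle
        simp [flushA, chunkLoopB, htake, hdrop, chunkLoopB_nil]
  | cons bit xs ih =>
    intro g lines c fuel hg hfuel
    rw [List.foldl_cons]
    by_cases hb : PySem.List.len (g ++ [bit]) = width
    · -- the chunk is complete: A flushes it, B takes exactly this slice
      have hlen : (g.length : Int) + 1 = width := by
        simpa [PySem.List.len] using hb
      have hfe : ∃ f, fuel = f + 1 := by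
        cases fuel with
        | zero => exfalso; simp at hfuel
        | succ f => exact ⟨f, rfl⟩
      obtain ⟨f, rfl⟩ := hfe
      have hassoc : g ++ bit :: xs = (g ++ [bit]) ++ xs := by simp
      have htake : PySem.List.slice ((g ++ [bit]) ++ xs) none (some width) = g ++ [bit] := by
        rw [PySem.List.slice_to _ (by omega)]
        have : width.toNat = (g ++ [bit]).length := by simp; omega
        rw [this]; exact List.take_left
      have hdrop : PySem.List.slice ((g ++ [bit]) ++ xs) (some width) none = xs := by
        rw [PySem.List.slice_from _ (by omega)]
        have : width.toNat = (g ++ [bit]).length := by simp; omega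
        rw [this]; exact List.drop_left
      have hcons : ∃ y ys, (g ++ [bit]) ++ xs = y :: ys := by
        cases hgb : (g ++ [bit]) ++ xs with
        | nil => exfalso; have := congrArg List.length hgb; simp at this
        | cons y ys => exact ⟨y, ys, rfl⟩
      obtain ⟨y, ys, hys⟩ := hcons
      rw [hassoc, hys]
      have hstep : stepA label width (lines, g, c) bit
          = (lines ++ [label ++ fmtOct3 c ++ ": " ++ PySem.Str.join " " (g ++ [bit])], ([] : List String), c + 1) := by
        simp [stepA, hlen]
      rw [hstep]
      have := ih ([]) (lines ++ [label ++ fmtOct3 c ++ ": " ++ PySem.Str.join " " (g ++ [bit])]) (c + 1) f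
        (by simp; omega) (by simp at hfuel ⊢; omega)
      simp only [List.nil_append] at this
      rw [this]
      show chunkLoopB label width f xs (c + 1) _ = chunkLoopB label width (f + 1) (y :: ys) c lines
      conv_rhs => rw [chunkLoopB]
      rw [← hys, htake, hdrop]
    · -- chunk not complete: A just grows the buffer
      have hne : ¬ ((g.length : Int) + 1 = width) := by
        simpa [PySem.List.len] using hb
      have hlen : ((g ++ [bit]).length : Int) < width := by simp; omega
      have hstep : stepA label width (lines, g, c) bit = (lines, g ++ [bit], c) := by
        simp [stepA, hne]
      rw [hstep]
      have := ih (g ++ [bit]) lines c fuel hlen (by simp at hfuel ⊢; omega)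
      rw [this]
      have : (g ++ [bit]) ++ xs = g ++ bit :: xs := by simp
      rw [this]

-- ===== VERDICT (by name: the statement is the Claim_ definition above) =====
theorem chunk_lines_spec : Claim_equal_chunk_lines := by
  intro bits label width _ hpre
  unfold Spec_chunk_lines
  rcases hpre with hnil | hw
  · subst hnil; rfl
  · rw [chunk_lines_eq]
    unfold chunk_lines_alt
    have := loop_main label width hw bits [] [] 1 bits.length (by simp; omega) (by simp)
    simpa using this
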